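-- pv_equiv track=rewrite | github.com/cerekinorg/Blonde-Blip | tui/test_generator.py | _extract_edge_cases
-- ===== SOURCE A (Python) =====
-- from typing import List, Dict, Any, Optional, Tuple
--
-- def _extract_edge_cases(entity: Dict[str, Any], source_code: str) -> List[str]:
--     """Extract potential edge cases from code"""
--     edge_cases = []
--
--     # Check for None checks
--     if 'is None' in source_code or '== None' in source_code:
--         edge_cases.append("None value input")
--
--     # Check for empty checks
--     if 'not ' in source_code and ('list' in source_code or 'dict' in source_code):
--         edge_cases.append("Empty list/dict input")
--
--     # Check for boundary conditions
--     if any(op in source_code for op in ['< 0', '> 0', '== 0']):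
--         edge_cases.append("Zero value input")
--
--     # Check for exception handling
--     if 'except' in source_code:
--         edge_cases.append("Error/Exception conditions")
--
--     return edge_cases
-- ===== SOURCE B (Python) =====
-- _PATTERNS = ['is None', '== None', 'not ', 'list', 'dict', '< 0', '> 0', '== 0', 'except']
--
-- # Each rule: (label, CNF groups) -- label fires iff every group has some pattern found.
-- _RULES = [
--     ("None value input", [['is None', '== None']]),
--     ("Empty list/dict input", [['not '], ['list', 'dict']]),
--     ("Zero value input", [['< 0', '> 0', '== 0']]),
--     ("Error/Exception conditions", [['except']]),
-- ]
--
--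
-- def _scan_patterns(source_code):
--     """One left-to-right pass over the text: at each index, record every pattern starting there."""
--     found = set()
--     for i in range(len(source_code) + 1):
--         for p in _PATTERNS:
--             if source_code.startswith(p, i):
--                 found.add(p)
--     return found
--
--
-- def _extract_edge_cases(entity, source_code):
--     """Extract potential edge cases from code (single-scan pattern set + CNF rules table)"""
--     found = _scan_patterns(source_code)
--     return [label for label, groups in _RULES
--             if all(any(p in found for p in group) for group in groups)]
-- ===== Notes on version B (the rewrite author's own statement) =====
-- stated objective: alternative
-- what changed: Replaced the four unrolled branches each doing independent substring searches by a single left-to-right scan of the text that collects the set of occurring patterns, followed by a CNF rules-table evaluation against that set.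
import Mathlib
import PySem

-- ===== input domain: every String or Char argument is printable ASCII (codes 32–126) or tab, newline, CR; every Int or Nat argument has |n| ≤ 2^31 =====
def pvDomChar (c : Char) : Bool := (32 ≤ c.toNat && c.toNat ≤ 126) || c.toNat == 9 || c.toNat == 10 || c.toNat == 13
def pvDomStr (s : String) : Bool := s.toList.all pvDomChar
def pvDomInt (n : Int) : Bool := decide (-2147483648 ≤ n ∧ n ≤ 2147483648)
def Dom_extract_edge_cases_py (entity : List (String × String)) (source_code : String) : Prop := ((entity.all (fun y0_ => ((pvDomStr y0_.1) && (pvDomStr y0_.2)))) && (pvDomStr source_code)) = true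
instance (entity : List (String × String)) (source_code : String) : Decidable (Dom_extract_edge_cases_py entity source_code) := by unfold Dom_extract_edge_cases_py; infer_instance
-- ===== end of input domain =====

-- B replaces A's four branches of independent substring searches by one left-to-right scan collecting a set of occurring patterns, evaluated against a CNF rules table (alternative algorithm, same cost).


-- ===== PORT A =====
-- Transliteration of A: sequential guard branches, each its own substring search, appending to edge_cases.
def extract_edge_cases_py (entity : List (String × String)) (source_code : String) : List String :=
  let edge_cases : List String := []
  let edge_cases :=
    if PySem.Str.isIn "is None" source_code || PySem.Str.isIn "== None" source_code then
      edge_cases ++ ["None value input"] else edge_cases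
  let edge_cases :=
    if PySem.Str.isIn "not " source_code &&
        (PySem.Str.isIn "list" source_code || PySem.Str.isIn "dict" source_code) then
      edge_cases ++ ["Empty list/dict input"] else edge_cases
  let edge_cases :=
    if (["< 0", "> 0", "== 0"] : List String).any (fun op => PySem.Str.isIn op source_code) then
      edge_cases ++ ["Zero value input"] else edge_cases
  let edge_cases :=
    if PySem.Str.isIn "except" source_code then
      edge_cases ++ ["Error/Exception conditions"] else edge_cases
  edge_cases

-- ===== PORT B =====
-- Transliteration of B: one scan over the text collecting the set of occurring patterns,
-- then a CNF rules table evaluated against that set.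
def pvPatterns : List String :=
  ["is None", "== None", "not ", "list", "dict", "< 0", "> 0", "== 0", "except"]

def pvRules : List (String × List (List String)) :=
  [ ("None value input", [["is None", "== None"]]),
    ("Empty list/dict input", [["not "], ["list", "dict"]]),
    ("Zero value input", [["< 0", "> 0", "== 0"]]),
    ("Error/Exception conditions", [["except"]]) ]

-- _scan_patterns: for i in range(len+1): for p in _PATTERNS: if source_code.startswith(p, i): found.add(p)
-- (Python's s.startswith(p, i) with 0 ≤ i is exactly: p.toList is a prefix of s.toList.drop i.)
def pvScan (source_code : String) : PySem.Set String :=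
  let s := source_code.toList
  (List.range (s.length + 1)).foldl
    (fun acc i =>
      pvPatterns.foldl
        (fun acc p => if p.toList.isPrefixOf (s.drop i) then PySem.Set.add acc p else acc)
        acc)
    PySem.Set.empty

def extract_edge_cases_py_alt (entity : List (String × String)) (source_code : String) : List String :=
  let found := pvScan source_code
  pvRules.filterMap (fun r =>
    if r.2.all (fun group => group.any (fun p => PySem.Set.contains found p)) then some r.1
    else none)

-- ===== PRECONDITION & SPEC =====
def Spec_extract_edge_cases_py (entity : List (String × String)) (source_code : String) (out : List String) : Prop := out = extract_edge_cases_py_alt entity source_code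
instance (entity : List (String × String)) (source_code : String) (out : List String) : Decidable (Spec_extract_edge_cases_py entity source_code out) := by unfold Spec_extract_edge_cases_py; infer_instance

-- ===== CLAIM (what is proved, stated in full; the proofs are below) =====
def Claim_equal_extract_edge_cases_py : Prop := ∀ (entity : List (String × String)) (source_code : String), Dom_extract_edge_cases_py entity source_code → Spec_extract_edge_cases_py entity source_code (extract_edge_cases_py entity source_code)

-- ===== LEMMAS AND PROOFS =====

lemma mem_scan_inner (s : List Char) (i : Nat) (ps : List String) (acc : List String) (q : String) :
    q ∈ ps.foldl (fun a p => if p.toList.isPrefixOf (s.drop i) then PySem.Set.add a p else a) acc ↔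
      q ∈ acc ∨ (q ∈ ps ∧ q.toList <+: s.drop i) := by
  induction ps generalizing acc with
  | nil => simp
  | cons p ps ih =>
    simp only [List.foldl_cons, ih, List.mem_cons]
    cases hb : p.toList.isPrefixOf (s.drop i)
    · rw [if_neg (by simp)]
      have h : ¬ p.toList <+: s.drop i := by
        rw [← List.isPrefixOf_iff_prefix, hb]; simp
      constructor
      · rintro (hq | ⟨hq, hpre⟩)
        · exact Or.inl hq
        · exact Or.inr ⟨Or.inr hq, hpre⟩
      · rintro (hq | ⟨(rfl | hq), hpre⟩)
        · exact Or.inl hq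
        · exact absurd hpre h
        · exact Or.inr ⟨hq, hpre⟩
    · rw [if_pos rfl, PySem.Set.mem_add]
      have h : p.toList <+: s.drop i := List.isPrefixOf_iff_prefix.mp hb
      constructor
      · rintro ((hq | rfl) | ⟨hq, hpre⟩)
        · exact Or.inl hq
        · exact Or.inr ⟨Or.inl rfl, h⟩
        · exact Or.inr ⟨Or.inr hq, hpre⟩
      · rintro (hq | ⟨(rfl | hq), hpre⟩)
        · exact Or.inl (Or.inl hq)
        · exact Or.inl (Or.inr rfl)
        · exact Or.inr ⟨hq, hpre⟩

lemma mem_scan_outer (s : List Char) (idxs : List Nat) (acc : List String) (q : String) :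
    q ∈ idxs.foldl
        (fun acc i =>
          pvPatterns.foldl
            (fun a p => if p.toList.isPrefixOf (s.drop i) then PySem.Set.add a p else a) acc)
        acc ↔
      q ∈ acc ∨ (q ∈ pvPatterns ∧ ∃ i ∈ idxs, q.toList <+: s.drop i) := by
  induction idxs generalizing acc with
  | nil => simp
  | cons i idxs ih =>
    simp only [List.foldl_cons, ih, mem_scan_inner, List.mem_cons]
    constructor
    · rintro ((hq | ⟨hp, hpre⟩) | ⟨hp, j, hj, hpre⟩)
      · exact Or.inl hq
      · exact Or.inr ⟨hp, i, Or.inl rfl, hpre⟩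
      · exact Or.inr ⟨hp, j, Or.inr hj, hpre⟩
    · rintro (hq | ⟨hp, j, (rfl | hj), hpre⟩)
      · exact Or.inl (Or.inl hq)
      · exact Or.inl (Or.inr ⟨hp, hpre⟩)
      · exact Or.inr ⟨hp, j, hj, hpre⟩

lemma contains_pvScan (sc : String) (p : String) (hp : p ∈ pvPatterns) :
    PySem.Set.contains (pvScan sc) p = PySem.Str.isIn p sc := by
  have hmem : p ∈ pvScan sc ↔ ∃ j, p.toList <+: sc.toList.drop j := by
    unfold pvScan
    rw [mem_scan_outer]
    constructor
    · rintro (h | ⟨-, i, -, hpre⟩)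
      · simp [PySem.Set.empty] at h
      · exact ⟨i, hpre⟩
    · rintro ⟨j, hpre⟩
      by_cases hj : j < sc.toList.length + 1
      · exact Or.inr ⟨hp, j, List.mem_range.mpr hj, hpre⟩
      · refine Or.inr ⟨hp, sc.toList.length, List.mem_range.mpr (Nat.lt_succ_self _), ?_⟩
        rw [List.drop_length]
        rwa [List.drop_eq_nil_of_le (by omega)] at hpre
  have h1 : PySem.Set.contains (pvScan sc) p = true ↔ PySem.Str.isIn p sc = true := by
    rw [PySem.Set.contains_iff, hmem, PySem.Str.isIn_iff_infix,
      ← PySem.Chars.isIn_iff_infix, ← PySem.Chars.exists_prefix_drop_iff_isIn]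
  cases hA : PySem.Set.contains (pvScan sc) p <;> cases hB : PySem.Str.isIn p sc
  · rfl
  · have h2 := h1.mpr hB; rw [hA] at h2; exact absurd h2 Bool.false_ne_true
  · have h2 := h1.mp hA; rw [hB] at h2; exact absurd h2 Bool.false_ne_true
  · rfl

-- ===== VERDICT (by name: the statement is the Claim_ definition above) =====
theorem extract_edge_cases_py_spec : Claim_equal_extract_edge_cases_py := by
  intro entity sc _
  unfold Spec_extract_edge_cases_py extract_edge_cases_py extract_edge_cases_py_alt
  simp only [pvRules, List.filterMap_cons, List.filterMap_nil, List.all_cons, List.all_nil,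
    List.any_cons, List.any_nil, Bool.or_false, Bool.and_true]
  rw [contains_pvScan sc "is None" (by decide), contains_pvScan sc "== None" (by decide),
    contains_pvScan sc "not " (by decide), contains_pvScan sc "list" (by decide),
    contains_pvScan sc "dict" (by decide), contains_pvScan sc "< 0" (by decide),
    contains_pvScan sc "> 0" (by decide), contains_pvScan sc "== 0" (by decide),
    contains_pvScan sc "except" (by decide)]
  generalize PySem.Str.isIn "is None" sc = b1
  generalize PySem.Str.isIn "== None" sc = b2
  generalize PySem.Str.isIn "not " sc = b3
  generalize PySem.Str.isIn "list" sc = b4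
  generalize PySem.Str.isIn "dict" sc = b5
  generalize PySem.Str.isIn "< 0" sc = b6
  generalize PySem.Str.isIn "> 0" sc = b7
  generalize PySem.Str.isIn "== 0" sc = b8
  generalize PySem.Str.isIn "except" sc = b9
  revert b1 b2 b3 b4 b5 b6 b7 b8 b9
  decide
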